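-- pv_equiv track=rewrite | github.com/Subikesh/Data-Structures-and-algorithms | foobar_google.py | get_stingy
-- ===== SOURCE A (Python) =====
-- def get_stingy(n):
--     # if the numbers are fibonacci series
--     a = b = 1
--     count = 2
--     summ = 2
--     while summ <= n:
--         c = a+b
--         a, b = b, c
--         summ += c
--         count += 1
--     count -= 1
--     return count
-- ===== SOURCE B (Python) =====
-- def _fib(k):
--     # fast doubling: returns (F(k), F(k+1)) with F(1) = F(2) = 1
--     if k == 0:
--         return (0, 1)
--     a, b = _fib(k // 2)
--     c = a * (2 * b - a)
--     d = a * a + b * b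
--     if k % 2:
--         return (d, c + d)
--     return (c, d)
--
-- def get_stingy(n):
--     # The sum of the first k Fibonacci terms is F(k+2)-1, so the answer is the
--     # largest k >= 1 with F(k+2) <= n+1; find that index by exponential plus
--     # binary search, computing each needed Fibonacci number by fast doubling.
--     target = n + 1
--     if _fib(3)[0] > target:
--         return 1
--     hi = 2
--     while _fib(hi + 2)[0] <= target:
--         hi *= 2
--     lo = 1
--     while hi - lo > 1:
--         mid = (lo + hi) // 2
--         if _fib(mid + 2)[0] <= target:
--             lo = mid
--         else:
--             hi = mid
--     return lo
-- ===== Notes on version B (the rewrite author's own statement) =====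
-- stated objective: alternative
-- what changed: B replaces A's linear loop with a running sum by an exponential-plus-binary search for the largest index k with F(k+2) <= n+1 (the sum of the first k Fibonacci terms is F(k+2)-1), computing each probed Fibonacci number on demand with the fast-doubling recursion.
import Mathlib
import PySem

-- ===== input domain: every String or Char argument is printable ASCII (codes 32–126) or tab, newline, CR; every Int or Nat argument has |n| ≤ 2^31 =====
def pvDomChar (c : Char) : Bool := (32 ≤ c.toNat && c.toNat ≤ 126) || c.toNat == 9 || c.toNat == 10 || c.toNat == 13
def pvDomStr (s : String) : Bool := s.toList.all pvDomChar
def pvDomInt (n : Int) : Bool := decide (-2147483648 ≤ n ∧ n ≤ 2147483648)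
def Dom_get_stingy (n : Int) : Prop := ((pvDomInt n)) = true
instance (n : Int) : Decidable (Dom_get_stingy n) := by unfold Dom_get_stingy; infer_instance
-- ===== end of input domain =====

-- B replaces A's linear running-sum loop by an exponential + binary search for the
-- largest k with F(k+2) <= n+1 (the sum of the first k Fibonacci terms is F(k+2)-1),
-- computing each Fibonacci number on demand by fast doubling (objective: alternative).

-- ===== PORT A =====
-- A's while loop over state (a, b, summ, count); the proof arguments 1 ≤ a, 1 ≤ b
-- are totality guards only (they hold at the call site and are preserved).
def pvLoopA (n a b summ count : Int) (ha : 1 ≤ a) (hb : 1 ≤ b) : Int :=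
  if h : summ ≤ n then
    pvLoopA n b (a + b) (summ + (a + b)) (count + 1) hb (by omega)
  else count
termination_by (n + 1 - summ).toNat
decreasing_by omega

def get_stingy (n : Int) : Int :=
  pvLoopA n 1 1 2 2 (by norm_num) (by norm_num) - 1

-- ===== PORT B =====
-- _fib, fast doubling: returns (F(k), F(k+1)); always called with k ≥ 0, so the
-- index is a Nat and Python's k // 2 is Nat division (exact for k ≥ 0).
def pvFib (k : Nat) : Int × Int :=
  if hk : k = 0 then (0, 1)
  else
    let p := pvFib (k / 2)
    let a := p.1
    let b := p.2
    let c := a * (2 * b - a)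
    let d := a * a + b * b
    if k % 2 = 1 then (d, c + d) else (c, d)
termination_by k
decreasing_by exact Nat.div_lt_self (Nat.pos_of_ne_zero hk) (by norm_num)

-- the two lemmas below are cited by pvExpLoop's termination proof
theorem pvFib_cast_two_mul (q : Nat) :
    (Nat.fib (2 * q) : Int) = (Nat.fib q : Int) * (2 * (Nat.fib (q + 1) : Int) - (Nat.fib q : Int)) := by
  have hm : Nat.fib q ≤ 2 * Nat.fib (q + 1) :=
    le_trans (Nat.fib_mono (by omega : q ≤ q + 1)) (by omega)
  rw [Nat.fib_two_mul]
  push_cast [hm]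
  ring

theorem pvFib_eq (k : Nat) : pvFib k = ((Nat.fib k : Int), (Nat.fib (k + 1) : Int)) := by
  induction k using Nat.strong_induction_on with
  | _ k ih =>
    rw [pvFib]
    rcases Nat.eq_zero_or_pos k with h0 | hpos
    · simp [h0]
    · rw [dif_neg (by omega), ih (k / 2) (by omega)]
      rcases Nat.even_or_odd k with ⟨q, hq⟩ | ⟨q, hq⟩
      · -- k = 2 * q
          have hk2 : k = 2 * q := by omega
          subst hk2
          have hd : 2 * q / 2 = q := by omega
          have hp : ¬ (2 * q % 2 = 1) := by omega
          simp only [hd, if_neg hp, Prod.mk.injEq]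
          refine ⟨(pvFib_cast_two_mul q).symm, ?_⟩
          rw [Nat.fib_two_mul_add_one]
          push_cast
          ring
      · -- k = 2 * q + 1
          have hk2 : k = 2 * q + 1 := by omega
          subst hk2
          have hd : (2 * q + 1) / 2 = q := by omega
          have hp : (2 * q + 1) % 2 = 1 := by omega
          simp only [hd, if_pos hp, Prod.mk.injEq]
          constructor
          · rw [Nat.fib_two_mul_add_one]
            push_cast
            ring
          · have hsucc : Nat.fib (2 * q + 1 + 1) = Nat.fib (2 * q) + Nat.fib (2 * q + 1) := by
              simpa using Nat.fib_add_two (n := 2 * q)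
            rw [hsucc, Nat.fib_two_mul_add_one]
            push_cast
            rw [pvFib_cast_two_mul]
            ring

theorem pvFib_fst_lb (k : Nat) : (k : Int) - 1 ≤ (pvFib k).1 := by
  rw [pvFib_eq]
  have h : k ≤ Nat.fib k + 1 := by
    induction k using Nat.strong_induction_on with
    | _ k ih =>
      match k with
      | 0 => decide
      | 1 => decide
      | 2 => decide
      | 3 => decide
      | (m + 4) =>
        have h1 := ih (m + 2) (by omega)
        have h2 : 2 ≤ Nat.fib (m + 3) :=
          le_trans (by decide : 2 ≤ Nat.fib 3) (Nat.fib_mono (by omega))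
        have h3 : Nat.fib (m + 4) = Nat.fib (m + 2) + Nat.fib (m + 3) := by
          simpa [show m + 2 + 2 = m + 4 from by ring, show m + 2 + 1 = m + 3 from by ring]
            using Nat.fib_add_two (n := m + 2)
        omega
  have hc : (k : Int) ≤ (Nat.fib k : Int) + 1 := by exact_mod_cast h
  show (k : Int) - 1 ≤ (Nat.fib k : Int)
  omega
def pvFibI (k : Int) : Int × Int := pvFib k.toNat

-- while _fib(hi+2)[0] <= target: hi *= 2   (the 2 ≤ hi argument is a totality guard)
def pvExpLoop (target hi : Int) (h2 : 2 ≤ hi) : Int :=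
  if h : (pvFibI (hi + 2)).1 ≤ target then pvExpLoop target (hi * 2) (by omega) else hi
termination_by (target - hi).toNat
decreasing_by
  have hb := pvFib_fst_lb (hi + 2).toNat
  simp only [pvFibI] at h
  omega

-- while hi - lo > 1: bisect on _fib(mid+2)[0] <= target
def pvBinLoop (target lo hi : Int) : Int :=
  if h : hi - lo > 1 then
    let mid := PySem.Int.floordiv (lo + hi) 2
    if (pvFibI (mid + 2)).1 ≤ target then pvBinLoop target mid hi else pvBinLoop target lo mid
  else lo
termination_by (hi - lo).toNat
decreasing_by
  all_goals
    simp only [PySem.Int.floordiv_eq_ediv_of_pos (by norm_num : (0:Int) < 2)]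
    omega

def get_stingy_alt (n : Int) : Int :=
  let target := n + 1
  if (pvFibI 3).1 > target then 1
  else pvBinLoop target 1 (pvExpLoop target 2 (by norm_num))

-- ===== PRECONDITION & SPEC =====
def Spec_get_stingy (n : Int) (out : Int) : Prop := out = get_stingy_alt n
instance (n : Int) (out : Int) : Decidable (Spec_get_stingy n out) := by unfold Spec_get_stingy; infer_instance

-- ===== CLAIM (what is proved, stated in full; the proofs are below) =====
def Claim_equal_get_stingy : Prop := ∀ (n : Int), Dom_get_stingy n → Spec_get_stingy n (get_stingy n)

-- ===== LEMMAS AND PROOFS =====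

-- pvF i = F(i.toNat), the Fibonacci numbers both programs walk through
def pvF (i : Int) : Int := (Nat.fib i.toNat : Int)

-- the characterisation both results satisfy (for n ≥ 1): r is the unique index
-- with F(r+2) ≤ n+1 < F(r+3)
def pvGood (n r : Int) : Prop := 1 ≤ r ∧ pvF (r + 2) ≤ n + 1 ∧ n + 1 < pvF (r + 3)

theorem pvF_rec (c : Int) (h : 1 ≤ c) : pvF (c + 1) = pvF c + pvF (c - 1) := by
  unfold pvF
  have h1 : (c + 1).toNat = (c - 1).toNat + 2 := by omega
  have h2 : c.toNat = (c - 1).toNat + 1 := by omega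
  rw [h1, h2, Nat.fib_add_two]
  push_cast; ring

theorem pvF_mono {i j : Int} (h : i ≤ j) : pvF i ≤ pvF j := by
  unfold pvF
  exact_mod_cast Nat.fib_mono (by omega)

theorem pvGood_uniq (n r r' : Int) (h : pvGood n r) (h' : pvGood n r') : r = r' := by
  obtain ⟨h1, h2, h3⟩ := h
  obtain ⟨h1', h2', h3'⟩ := h'
  by_contra hne
  rcases lt_or_gt_of_ne hne with hlt | hgt
  · have := pvF_mono (show r + 3 ≤ r' + 2 by omega); omega
  · have := pvF_mono (show r' + 3 ≤ r + 2 by omega); omega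

theorem pvFibI_fst (k : Int) : (pvFibI k).1 = pvF k := by
  simp [pvFibI, pvFib_eq, pvF]

-- A's loop, at any reachable state, returns (count-1) satisfying pvGood
theorem loopA_good (m : Nat) : ∀ (n a b summ c : Int) (ha : 1 ≤ a) (hb : 1 ≤ b),
    a = pvF (c - 1) → b = pvF c → summ = pvF (c + 2) - 1 → 2 ≤ c →
    pvF (c + 1) - 1 ≤ n → m = (n + 1 - summ).toNat →
    pvGood n (pvLoopA n a b summ c ha hb - 1) := by
  induction m using Nat.strong_induction_on with
  | _ m ih =>
    intro n a b summ c ha hb hA hB hS hc hInv hm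
    rw [pvLoopA]
    by_cases h : summ ≤ n
    · rw [dif_pos h]
      refine ih (n + 1 - (summ + (a + b))).toNat (by omega) n b (a + b) _ (c + 1) hb
        (by omega) ?_ ?_ ?_ (by omega) ?_ rfl
      · rw [show c + 1 - 1 = c by ring]; exact hB
      · rw [pvF_rec c (by omega), hA, hB]; ring
      · rw [show c + 1 + 2 = (c + 2) + 1 by ring, pvF_rec (c + 2) (by omega),
          show c + 2 - 1 = c + 1 by ring, pvF_rec c (by omega), hA, hB, hS]
        ring
      · rw [show c + 1 + 1 = c + 2 by ring]
        omega
    · rw [dif_neg h]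
      refine ⟨by omega, ?_, ?_⟩
      · rw [show c - 1 + 2 = c + 1 by ring]; omega
      · rw [show c - 1 + 3 = c + 2 by ring]; omega

theorem A_good (n : Int) (hn : 1 ≤ n) : pvGood n (get_stingy n) := by
  unfold get_stingy
  refine loopA_good (n + 1 - 2).toNat n 1 1 2 2 _ _ ?_ ?_ ?_ (by norm_num) ?_ rfl
  · decide
  · decide
  · decide
  · have : pvF (2 + 1) = 2 := by decide
    omega

-- the exponential search returns hi with target < F(hi+2), hi ≥ the start value
theorem expLoop_gt (m : Nat) : ∀ (target hi : Int) (h2 : 2 ≤ hi), m = (target - hi).toNat →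
    target < pvF (pvExpLoop target hi h2 + 2) ∧ 2 ≤ pvExpLoop target hi h2 := by
  induction m using Nat.strong_induction_on with
  | _ m ih =>
    intro target hi h2 hm
    rw [pvExpLoop]
    by_cases h : (pvFibI (hi + 2)).1 ≤ target
    · rw [dif_pos h]
      have hb := pvFib_fst_lb (hi + 2).toNat
      simp only [pvFibI] at h
      exact ih (target - hi * 2).toNat (by omega) target (hi * 2) (by omega) rfl
    · rw [dif_neg h]
      rw [pvFibI_fst] at h
      exact ⟨by omega, h2⟩

-- the binary search maintains F(lo+2) ≤ target < F(hi+2) and lands on pvGood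
theorem binLoop_good (m : Nat) : ∀ (target lo hi : Int), 1 ≤ lo → lo < hi →
    pvF (lo + 2) ≤ target → target < pvF (hi + 2) → m = (hi - lo).toNat →
    1 ≤ pvBinLoop target lo hi ∧ pvF (pvBinLoop target lo hi + 2) ≤ target ∧
      target < pvF (pvBinLoop target lo hi + 3) := by
  induction m using Nat.strong_induction_on with
  | _ m ih =>
    intro target lo hi hlo hlt hL hH hm
    rw [pvBinLoop]
    by_cases h : hi - lo > 1
    · rw [dif_pos h]
      have hmid : lo < PySem.Int.floordiv (lo + hi) 2 ∧ PySem.Int.floordiv (lo + hi) 2 < hi := by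
        rw [PySem.Int.floordiv_eq_ediv_of_pos (by norm_num : (0:Int) < 2)]
        omega
      set mid := PySem.Int.floordiv (lo + hi) 2 with hmdef
      by_cases hc : (pvFibI (mid + 2)).1 ≤ target
      · rw [if_pos hc]
        rw [pvFibI_fst] at hc
        exact ih (hi - mid).toNat (by omega) target mid hi (by omega) (by omega) hc hH rfl
      · rw [if_neg hc]
        rw [pvFibI_fst, not_le] at hc
        exact ih (mid - lo).toNat (by omega) target lo mid hlo (by omega) hL hc rfl
    · rw [dif_neg h]
      have hhi : hi = lo + 1 := by omega
      refine ⟨hlo, hL, ?_⟩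
      rw [show lo + 3 = (lo + 1) + 2 by ring, ← hhi]
      exact hH

theorem pvF_three : pvF 3 = 2 := by unfold pvF; decide

theorem B_good (n : Int) (hn : 1 ≤ n) : pvGood n (get_stingy_alt n) := by
  unfold get_stingy_alt
  rw [if_neg (by rw [pvFibI_fst, pvF_three]; omega)]
  obtain ⟨hgt, hge⟩ := expLoop_gt (n + 1 - 2).toNat (n + 1) 2 (by norm_num) rfl
  have := binLoop_good (pvExpLoop (n + 1) 2 (by norm_num) - 1).toNat (n + 1) 1
    (pvExpLoop (n + 1) 2 (by norm_num)) (by norm_num) (by omega)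
    (by rw [show (1:Int) + 2 = 3 by norm_num, pvF_three]; omega) hgt rfl
  exact ⟨this.1, this.2.1, this.2.2⟩

-- ===== VERDICT (by name: the statement is the Claim_ definition above) =====
theorem get_stingy_spec : Claim_equal_get_stingy := by
  intro n _
  unfold Spec_get_stingy
  by_cases hn : 1 ≤ n
  · exact pvGood_uniq n _ _ (A_good n hn) (B_good n hn)
  · have hA : get_stingy n = 1 := by
      unfold get_stingy
      rw [pvLoopA, dif_neg (by omega)]
      norm_num
    have hB : get_stingy_alt n = 1 := by
      unfold get_stingy_alt
      rw [if_pos (by rw [pvFibI_fst, pvF_three]; omega)]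
    rw [hA, hB]
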